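-- pv_equiv track=rewrite | github.com/nir20ane/Python | leetcode/Lists_and_Strings/sol.py | solution
-- ===== SOURCE A (Python) =====
-- def solution(n):
--     narr = []
--     for i in range(len(str(n))):
--         narr.append(int(str(n)[i]))
--     narr.sort(reverse = True)
--
--     strr = ""
--     for i in narr:
--         strr += str(i)
--     if n < int(strr):
--         return int(strr)
--     else:
--         return n
-- ===== SOURCE B (Python) =====
-- def solution(n):
--     # Counting/bucket pass over the digits instead of a comparison sort.
--     counts = [0] * 10
--     for ch in str(n):
--         counts[int(ch)] += 1
--     strr = ""
--     for d in range(9, -1, -1):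
--         strr += str(d) * counts[d]
--     m = int(strr)
--     return m if n < m else n
-- ===== Notes on version B (the rewrite author's own statement) =====
-- stated objective: alternative
-- what changed: Replaces A's comparison sort of the digit list (narr.sort(reverse=True)) by a length-10 counting/bucket pass over the characters of str(n), then emits the descending digit string by scanning buckets 9..0.
import Mathlib
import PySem

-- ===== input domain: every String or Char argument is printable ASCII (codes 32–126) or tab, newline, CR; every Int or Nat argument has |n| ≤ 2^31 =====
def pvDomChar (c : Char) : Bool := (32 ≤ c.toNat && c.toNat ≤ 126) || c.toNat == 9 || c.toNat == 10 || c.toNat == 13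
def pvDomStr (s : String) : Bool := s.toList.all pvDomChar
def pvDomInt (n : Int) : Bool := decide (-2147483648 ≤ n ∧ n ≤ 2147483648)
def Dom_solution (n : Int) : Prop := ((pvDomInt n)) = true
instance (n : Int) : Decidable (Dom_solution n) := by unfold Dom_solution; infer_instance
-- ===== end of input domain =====

-- B replaces A's comparison sort of the digits by a counting/bucket pass (objective: alternative algorithm, similar cost at these sizes).

-- ===== PORT A =====
def solution (n : Int) : Int :=
  -- narr = []; for i in range(len(str(n))): narr.append(int(str(n)[i]))
  let s := PySem.Int.toStr n
  let narr : List Int :=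
    (PySem.List.pyRange 0 (PySem.Str.len s) 1).foldl
      (fun acc i =>
        acc ++ [(((PySem.Str.pyGet? s i).bind (fun c => PySem.Int.ofChars? [c])).getD 0)]) []
  -- narr.sort(reverse = True)
  let narr2 := PySem.List.sorted narr (fun x => x) true
  -- strr = ""; for i in narr: strr += str(i)
  let strr : List Char := narr2.foldl (fun acc i => acc ++ PySem.Int.toChars i) []
  let v := (PySem.Int.ofChars? strr).getD 0
  if n < v then v else n

-- ===== PORT B =====
def solution_alt (n : Int) : Int :=
  -- counts = [0]*10; for ch in str(n): counts[int(ch)] += 1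
  let counts : List Int :=
    (PySem.Int.toChars n).foldl
      (fun cnt c =>
        let d := ((PySem.Int.ofChars? [c]).getD 0).toNat
        cnt.set d (cnt.getD d 0 + 1))
      (List.replicate 10 0)
  -- strr = ""; for d in range(9, -1, -1): strr += str(d) * counts[d]
  let strr : List Char :=
    (PySem.List.pyRange 9 (-1) (-1)).foldl
      (fun acc d =>
        acc ++ (List.replicate (counts.getD d.toNat 0).toNat (PySem.Int.toChars d)).flatten) []
  let m := (PySem.Int.ofChars? strr).getD 0
  if n < m then m else n

-- ===== PRECONDITION & SPEC =====
-- Pre_ excludes negative n, on which A (like B) raises ValueError at int('-').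
def Pre_solution (n : Int) : Prop := 0 ≤ n
instance (n : Int) : Decidable (Pre_solution n) := by unfold Pre_solution; infer_instance
def pvWitness_solution : Int := (2102)

def Spec_solution (n : Int) (out : Int) : Prop := out = solution_alt n
instance (n : Int) (out : Int) : Decidable (Spec_solution n out) := by unfold Spec_solution; infer_instance

-- ===== CLAIM (what is proved, stated in full; the proofs are below) =====
def Claim_equal_solution : Prop := ∀ (n : Int), Dom_solution n → Pre_solution n → Spec_solution n (solution n)

-- ===== LEMMAS AND PROOFS =====

-- the integer value A and B read from a one-digit string
def dval (c : Char) : Int := (PySem.Int.ofChars? [c]).getD 0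

-- every character produced by Nat.toDigitsCore base 10 is a digit char (or came from the accumulator)
theorem toDigitsCore_mem (fuel : Nat) : ∀ (m : Nat) (acc : List Char) (c : Char),
    c ∈ Nat.toDigitsCore 10 fuel m acc → c ∈ acc ∨ ∃ d : Nat, d < 10 ∧ c = Nat.digitChar d := by
  induction fuel with
  | zero => intro m acc c h; exact Or.inl h
  | succ f ih =>
    intro m acc c h
    rw [Nat.toDigitsCore] at h
    by_cases h0 : m / 10 = 0
    · rw [if_pos h0] at h
      rcases List.mem_cons.mp h with h | h
      · exact Or.inr ⟨m % 10, Nat.mod_lt _ (by norm_num), h⟩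
      · exact Or.inl h
    · rw [if_neg h0] at h
      rcases ih (m / 10) (Nat.digitChar (m % 10) :: acc) c h with h' | h'
      · rcases List.mem_cons.mp h' with h' | h'
        · exact Or.inr ⟨m % 10, Nat.mod_lt _ (by norm_num), h'⟩
        · exact Or.inl h'
      · exact Or.inr h'

theorem ofChars?_digitChar (d : Nat) (hd : d < 10) :
    PySem.Int.ofChars? [Nat.digitChar d] = some (d : Int) := by
  interval_cases d <;> decide

-- characters of str(n) for 0 ≤ n are digit chars
theorem toChars_digit {n : Int} (hn : 0 ≤ n) {c : Char} (hc : c ∈ PySem.Int.toChars n) :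
    ∃ d : Nat, d < 10 ∧ c = Nat.digitChar d := by
  unfold PySem.Int.toChars at hc
  rw [if_neg (by omega)] at hc
  rcases toDigitsCore_mem _ _ _ _ hc with h | h
  · simp at h
  · exact h

theorem dval_range {n : Int} (hn : 0 ≤ n) {c : Char} (hc : c ∈ PySem.Int.toChars n) :
    0 ≤ dval c ∧ dval c < 10 := by
  obtain ⟨d, hd, rfl⟩ := toChars_digit hn hc
  unfold dval
  rw [ofChars?_digitChar d hd]
  simp; omega

-- A's first loop builds exactly the list of digit values
theorem narr_eq (s : List Char) :
    ((List.range s.length).map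
      (fun k => (((s[(k : Nat)]?).bind (fun c => PySem.Int.ofChars? [c])).getD 0))) = s.map dval := by
  apply List.ext_getElem
  · simp
  · intro i h1 h2
    simp only [List.getElem_map, List.getElem_range]
    have : i < s.length := by simpa using h2
    rw [List.getElem?_eq_getElem this]
    rfl

theorem pyRange_zero_natCast (m : Nat) :
    PySem.List.pyRange 0 (m : Int) = List.map (fun k : Nat => (k : Int)) (List.range m) := by
  induction m with
  | zero => simp [PySem.List.pyRange]
  | succ k ih =>
    have h := PySem.List.pyRange_one_append 0 (k : Int) ((k : Int) + 1) (by positivity) (by omega)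
    have hlast : PySem.List.pyRange (k : Int) ((k : Int) + 1) = [(k : Int)] := by
      rw [PySem.List.pyRange_one_cons (by omega)]
      simp [PySem.List.pyRange]
    push_cast
    rw [h, hlast, ih, List.range_succ]
    simp

-- the counting fold computes occurrence counts
theorem counts_spec (l : List Int) : ∀ (c0 : List Int), c0.length = 10 →
    (∀ x ∈ l, 0 ≤ x ∧ x < 10) →
    (l.foldl (fun cnt x => cnt.set x.toNat (cnt.getD x.toNat 0 + 1)) c0).length = 10 ∧
    ∀ i : Nat, i < 10 →
      (l.foldl (fun cnt x => cnt.set x.toNat (cnt.getD x.toNat 0 + 1)) c0).getD i 0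
        = c0.getD i 0 + l.count (i : Int) := by
  induction l with
  | nil => intro c0 h10 _; simpa using h10
  | cons x t ih =>
    intro c0 h10 hmem
    have hx := hmem x (by simp)
    have hxlt : x.toNat < 10 := by omega
    have hset : (c0.set x.toNat (c0.getD x.toNat 0 + 1)).length = 10 := by simpa using h10
    obtain ⟨hl, hc⟩ := ih (c0.set x.toNat (c0.getD x.toNat 0 + 1)) hset
      (fun y hy => hmem y (by simp [hy]))
    refine ⟨by simpa [List.foldl_cons] using hl, ?_⟩
    intro i hi
    rw [List.foldl_cons, hc i hi]
    simp only [List.getD, List.getElem?_set]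
    by_cases hxi : x.toNat = i
    · have hxeq : x = (i : Int) := by omega
      rw [if_pos hxi, if_pos (by omega), List.count_cons, if_pos (by simp [hxeq])]
      simp only [Option.getD_some, hxi]
      push_cast
      omega
    · have hxne : x ≠ (i : Int) := by omega
      rw [if_neg hxi, List.count_cons, if_neg (by simp [hxne])]
      push_cast
      omega

-- counting reconstruction is a permutation of the original values
theorem count_flatMap_replicate (ds : List Int) (hnd : ds.Nodup) (cnt : Int → Nat) (a : Int) :
    (ds.flatMap fun d => List.replicate (cnt d) d).count a
      = if a ∈ ds then cnt a else 0 := by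
  induction ds with
  | nil => simp
  | cons d t ih =>
    simp only [List.flatMap_cons, List.count_append, List.count_replicate]
    rw [ih (List.Nodup.of_cons hnd)]
    by_cases hda : d = a
    · subst hda
      have : d ∉ t := (List.nodup_cons.mp hnd).1
      simp [this]
    · simp [hda, Ne.symm hda, List.mem_cons]

theorem pairwise_ge_flatMap_replicate (ds : List Int) (hds : ds.Pairwise (· > ·)) (cnt : Int → Nat) :
    (ds.flatMap fun d => List.replicate (cnt d) d).Pairwise (· ≥ ·) := by
  induction ds with
  | nil => simp
  | cons d t ih =>
    simp only [List.flatMap_cons]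
    rw [List.pairwise_append]
    refine ⟨?_, ih hds.of_cons, ?_⟩
    · exact List.pairwise_replicate.mpr (Or.inr (le_refl d))
    · intro a ha b hb
      rw [List.mem_replicate] at ha
      obtain ⟨e, he, hbe⟩ := List.mem_flatMap.mp hb
      rw [List.mem_replicate] at hbe
      have : d > e := (List.pairwise_cons.mp hds).1 e he
      omega

-- descending digit list: [9..0] with each digit repeated by its multiplicity
def descList (v : List Int) : List Int :=
  ([9,8,7,6,5,4,3,2,1,0] : List Int).flatMap (fun d => List.replicate (v.count d) d)

theorem mem_ds_iff (a : Int) : a ∈ ([9,8,7,6,5,4,3,2,1,0] : List Int) ↔ 0 ≤ a ∧ a < 10 := by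
  simp only [List.mem_cons, List.not_mem_nil, or_false]
  omega

theorem descList_perm (v : List Int) (hall : ∀ x ∈ v, 0 ≤ x ∧ x < 10) : (descList v).Perm v := by
  rw [List.perm_iff_count]
  intro a
  unfold descList
  rw [count_flatMap_replicate _ (by decide) _ a]
  by_cases ha : a ∈ ([9,8,7,6,5,4,3,2,1,0] : List Int)
  · rw [if_pos ha]
  · rw [if_neg ha, eq_comm, List.count_eq_zero]
    intro hav
    exact ha ((mem_ds_iff a).mpr (hall a hav))

theorem flatMap_singleton_map {A B : Type} (l : List A) (f : A → B) :
    l.flatMap (fun x => [f x]) = l.map f := by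
  induction l with
  | nil => rfl
  | cons a t ih => simp only [List.flatMap_cons, List.map_cons, List.singleton_append, ih]

theorem sorted_eq_descList (v : List Int) (hall : ∀ x ∈ v, 0 ≤ x ∧ x < 10) :
    PySem.List.sorted v (fun x => x) true = descList v := by
  apply List.Perm.eq_of_pairwise (le := fun a b => a ≥ b)
  · intro a b _ _ h1 h2; omega
  · simpa using PySem.List.sorted_pairwise_rev v (fun x => x)
  · exact pairwise_ge_flatMap_replicate _ (by decide) _
  · exact (PySem.List.sorted_perm v _ _).trans (descList_perm v hall).symm

-- ===== VERDICT (by name: the statement is the Claim_ definition above) =====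
theorem solution_spec : Claim_equal_solution := by
  intro n _ hpre
  unfold Spec_solution solution solution_alt
  have hpre' : (0:Int) ≤ n := hpre
  set s : List Char := PySem.Int.toChars n with hs
  set v : List Int := s.map dval with hv
  have hall : ∀ x ∈ v, 0 ≤ x ∧ x < 10 := by
    intro x hx
    obtain ⟨c, hc, rfl⟩ := List.mem_map.mp hx
    exact dval_range hpre' hc
  simp only []
  -- A's first loop equals v
  have hlen : PySem.Str.len (PySem.Int.toStr n) = (s.length : Int) := by
    simp [PySem.Int.toList_toStr, hs]
  have hget : ∀ (k : Nat), PySem.Str.pyGet? (PySem.Int.toStr n) (k : Int) = s[k]? := by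
    intro k
    rw [PySem.Str.pyGet?_natCast, show (PySem.Int.toStr n).toList = s from PySem.Int.toList_toStr n]
  have hnarr :
      (PySem.List.pyRange 0 (PySem.Str.len (PySem.Int.toStr n)) 1).foldl
        (fun acc i =>
          acc ++ [(((PySem.Str.pyGet? (PySem.Int.toStr n) i).bind
              (fun c => PySem.Int.ofChars? [c])).getD 0)]) [] = v := by
    rw [hlen, pyRange_zero_natCast, List.foldl_map, PySem.List.foldl_append_eq_flatMap]
    simp only [List.nil_append, hget]
    rw [flatMap_singleton_map, narr_eq s]
  rw [hnarr]
  -- B's counting fold over chars = counting fold over values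
  have hfold :
      s.foldl (fun cnt c =>
          cnt.set ((PySem.Int.ofChars? [c]).getD 0).toNat
            (cnt.getD ((PySem.Int.ofChars? [c]).getD 0).toNat 0 + 1)) (List.replicate 10 (0:Int))
        = v.foldl (fun cnt x => cnt.set x.toNat (cnt.getD x.toNat 0 + 1)) (List.replicate 10 (0:Int)) := by
    rw [hv, List.foldl_map]
    rfl
  obtain ⟨_, hcnt⟩ := counts_spec v (List.replicate 10 0) (by simp) hall
  -- both strings coincide
  rw [sorted_eq_descList v hall, PySem.List.foldl_append_eq_flatMap,
      PySem.List.foldl_append_eq_flatMap]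
  simp only [hfold]
  have hstr :
      (descList v).flatMap PySem.Int.toChars =
      (PySem.List.pyRange 9 (-1) (-1)).flatMap (fun d =>
        (List.replicate
            (((v.foldl (fun cnt x => cnt.set x.toNat (cnt.getD x.toNat 0 + 1))
                (List.replicate 10 (0:Int))).getD d.toNat 0).toNat)
            (PySem.Int.toChars d)).flatten) := by
    rw [show PySem.List.pyRange 9 (-1) (-1) = ([9,8,7,6,5,4,3,2,1,0] : List Int) from by decide]
    unfold descList
    rw [List.flatMap_assoc]
    rw [List.flatMap_def, List.flatMap_def]
    apply congrArg
    apply List.map_congr_left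
    intro d hd
    have hdr : 0 ≤ d ∧ d < 10 := (mem_ds_iff d).mp hd
    have hdn : d.toNat < 10 := by omega
    rw [hcnt d.toNat hdn]
    have hdc : ((d.toNat : Nat) : Int) = d := by omega
    rw [hdc]
    have hz : (List.replicate 10 (0:Int)).getD d.toNat 0 = 0 := by
      rw [List.getD, List.getElem?_replicate]
      simp [hdn]
    rw [hz, zero_add, Int.toNat_natCast]
    rw [List.flatMap_replicate]
  rw [hstr]
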